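-- pv_equiv track=rewrite | github.com/fossasia/eventyay-tickets | app/eventyay/person/utils.py | get_or_create_email_for_wikimedia_user
-- ===== SOURCE A (Python) =====
-- def get_or_create_email_for_wikimedia_user(username, email=None, user_id=None):
--     """
--     Generate an email for Wikimedia users.
--
--     Sanitizes username to ensure valid email format and uniqueness.
--     Falls back to user ID if username is empty or invalid.
--
--     Args:
--         username (str): Wikimedia username
--         email (str): Email from Wikimedia profile (can be None)
--         user_id: Wikimedia user ID for uniqueness and fallback
--
--     Returns:
--         str: Email address
--     """
--     if email and email.strip():
--         return email
--
--     # Sanitize username: lowercase, strip, replace whitespace with dots, remove invalid chars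
--     if username:
--         sanitized = username.lower().strip()
--         sanitized = sanitized.replace(' ', '.').replace('_', '.')
--         sanitized = ''.join(c for c in sanitized if c.isalnum() or c in '.-')
--         while '..' in sanitized:
--             sanitized = sanitized.replace('..', '.')
--         sanitized = sanitized.strip('.')
--     else:
--         sanitized = None
--
--     # If sanitized username is empty or invalid, use user ID as fallback
--     if sanitized:
--         if user_id:
--             return f"{sanitized}.{user_id}@wikimedia.local"
--         return f"{sanitized}@wikimedia.local"
--     else:
--         # Fallback: use Wikimedia user ID only
--         if user_id:
--             return f"wm.{user_id}@wikimedia.local"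
--         else:
--             return "wikimedia.user@wikimedia.local"
-- ===== SOURCE B (Python) =====
-- def get_or_create_email_for_wikimedia_user(username, email=None, user_id=None):
--     if email and email.strip():
--         return email
--     if username:
--         sanitized = username.lower().strip()
--         sanitized = sanitized.replace(' ', '.').replace('_', '.')
--         sanitized = ''.join(c for c in sanitized if c.isalnum() or c in '.-')
--         sanitized = '.'.join(part for part in sanitized.split('.') if part)
--     else:
--         sanitized = None
--     if sanitized:
--         if user_id:
--             return f"{sanitized}.{user_id}@wikimedia.local"
--         return f"{sanitized}@wikimedia.local"
--     if user_id:
--         return f"wm.{user_id}@wikimedia.local"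
--     return "wikimedia.user@wikimedia.local"
-- ===== Notes on version B (the rewrite author's own statement) =====
-- stated objective: simpler
-- what changed: A normalizes dots with a fixpoint loop that repeatedly replaces each two-dot run by a single dot and then strips boundary dots; B does the whole normalization in one pass by splitting on the dot, dropping empty parts and joining with a dot; the email guard, the character filter and the fallback branches are unchanged.
import Mathlib
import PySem

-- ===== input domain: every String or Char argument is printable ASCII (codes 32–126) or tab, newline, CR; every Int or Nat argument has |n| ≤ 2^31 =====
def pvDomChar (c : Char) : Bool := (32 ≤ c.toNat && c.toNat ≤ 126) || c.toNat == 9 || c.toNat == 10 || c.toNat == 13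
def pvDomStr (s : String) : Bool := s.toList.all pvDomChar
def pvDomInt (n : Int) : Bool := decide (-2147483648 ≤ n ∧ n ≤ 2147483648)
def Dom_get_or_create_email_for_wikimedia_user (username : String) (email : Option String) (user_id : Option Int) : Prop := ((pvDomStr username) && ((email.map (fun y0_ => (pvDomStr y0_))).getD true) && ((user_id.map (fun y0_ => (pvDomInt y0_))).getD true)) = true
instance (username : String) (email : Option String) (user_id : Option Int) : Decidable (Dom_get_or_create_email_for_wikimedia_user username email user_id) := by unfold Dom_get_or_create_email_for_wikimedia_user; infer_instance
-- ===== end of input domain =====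

-- B replaces A's dot-normalization (a fixpoint loop collapsing two-dot runs, then a strip of
-- boundary dots) with a single split-on-dot / drop-empty-parts / join-with-dot pass; objective:
-- simpler (same guard, same character filter, same fallbacks; return values proved equal).

-- ===== PORT A =====
def pvRepOne : List Char → List Char
  | [] => []
  | [c] => [c]
  | a :: b :: t => if a = '.' ∧ b = '.' then '.' :: pvRepOne t else a :: pvRepOne (b :: t)

theorem pvRepOne_length_le (l : List Char) : (pvRepOne l).length ≤ l.length := by
  induction l using pvRepOne.induct with
  | case1 => simp [pvRepOne]
  | case2 c => simp [pvRepOne]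
  | case3 a b t h ih =>
    obtain ⟨ha, hb⟩ := h; subst ha; subst hb
    simp [pvRepOne]; omega
  | case4 a b t h ih =>
    simp [pvRepOne, if_neg h]
    simp at ih; omega

theorem pvReplace_go_eq (fuel : Nat) : ∀ (l acc : List Char), l.length ≤ fuel →
    PySem.Chars.replace.go ['.','.'] ['.'] fuel l acc = acc.reverse ++ pvRepOne l := by
  induction fuel with
  | zero =>
    intro l acc h
    have : l = [] := by cases l <;> simp_all
    subst this; simp [PySem.Chars.replace.go, pvRepOne]
  | succ f ih =>
    intro l acc h
    match l with
    | [] => simp [PySem.Chars.replace.go, pvRepOne]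
    | [c] =>
      have hpre : (['.','.'] : List Char).isPrefixOf [c] = false := by
        simp [List.isPrefixOf]
      simp only [PySem.Chars.replace.go, hpre, Bool.false_eq_true, if_false]
      rw [ih [] (c :: acc) (by simp)]
      simp [pvRepOne]
    | a :: b :: t =>
      by_cases hab : a = '.' ∧ b = '.'
      · obtain ⟨ha, hb⟩ := hab; subst ha; subst hb
        have hpre : (['.','.'] : List Char).isPrefixOf ('.' :: '.' :: t) = true := by
          simp [List.isPrefixOf]
        simp only [PySem.Chars.replace.go, hpre, if_pos]
        rw [show List.drop (['.','.'] : List Char).length ('.' :: '.' :: t) = t from rfl]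
        rw [ih t ((['.'] : List Char).reverse ++ acc) (by simp at h ⊢; omega)]
        simp [pvRepOne]
      · have hpre : (['.','.'] : List Char).isPrefixOf (a :: b :: t) = false := by
          simp [List.isPrefixOf]
          intro ha hb; exact absurd ⟨ha.symm, hb.symm⟩ hab
        simp only [PySem.Chars.replace.go, hpre, Bool.false_eq_true, if_false]
        rw [ih (b :: t) (a :: acc) (by simp at h ⊢; omega)]
        simp [pvRepOne, if_neg hab]

theorem pvReplace_dd (l : List Char) : PySem.Chars.replace l ['.','.'] ['.'] = pvRepOne l := by
  have he : (['.','.'] : List Char).isEmpty = false := rfl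
  simp only [PySem.Chars.replace, he, Bool.false_eq_true, if_false]
  rw [pvReplace_go_eq l.length l [] (le_refl _)]
  simp

theorem pvRepOne_length_lt (l : List Char) (h : ['.','.'] <:+: l) : (pvRepOne l).length < l.length := by
  induction l using pvRepOne.induct with
  | case1 => simp at h
  | case2 c =>
    exfalso
    rcases h with ⟨s, t, hst⟩
    have := congrArg List.length hst; simp at this; omega
  | case3 a b t hab ih =>
    obtain ⟨ha, hb⟩ := hab; subst ha; subst hb
    simp [pvRepOne]
    have := pvRepOne_length_le t; omega
  | case4 a b t hab ih =>
    have hbt : ['.','.'] <:+: (b :: t) := by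
      rcases h with ⟨s, r, hst⟩
      match s, hst with
      | [], hst =>
        exfalso
        have : a = '.' ∧ b = '.' := by
          have h2 : '.' :: '.' :: r = a :: b :: t := by simpa using hst
          injection h2 with h3 h4; injection h4 with h5 _
          exact ⟨h3.symm, h5.symm⟩
        exact hab this
      | x :: s', hst =>
        have h2 : s' ++ ['.','.'] ++ r = b :: t := by
          have := hst; simp at this; simpa using this.2
        exact ⟨s', r, h2⟩
    simp [pvRepOne, if_neg hab]
    have := ih hbt; simp at this; omega

-- A's while loop: `while '..' in sanitized: sanitized = sanitized.replace('..', '.')`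
def pvDedupLoop (s : String) : String :=
  if PySem.Str.isIn ".." s then pvDedupLoop (PySem.Str.replace s ".." ".") else s
termination_by s.toList.length
decreasing_by
  rename_i h
  rw [PySem.Str.toList_replace]
  rw [show (".." : String).toList = ['.','.'] from rfl, show ("." : String).toList = ['.'] from rfl]
  rw [pvReplace_dd]
  exact pvRepOne_length_lt _ ((PySem.Str.isIn_iff_infix ".." s).mp h)

def get_or_create_email_for_wikimedia_user (username : String) (email : Option String) (user_id : Option Int) : String :=
  let rest : String :=
    let sanitized : Option String :=
      if username != "" then
        let s1 := PySem.Str.replace (PySem.Str.replace (PySem.Str.strip (PySem.Str.lower username)) " " ".") "_" "."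
        -- ''.join(c for c in s1 if c.isalnum() or c in '.-'): joining singleton chars on "" is exactly String.ofList
        let s2 := String.ofList (s1.toList.filter (fun c => PySem.Chars.isalnum c || c == '.' || c == '-'))
        some (PySem.Str.stripChars (pvDedupLoop s2) ".")
      else none
    if sanitized.getD "" != "" then
      match user_id with
      | some u =>
        if u != 0 then PySem.Str.join "" [sanitized.getD "", ".", PySem.Int.toStr u, "@wikimedia.local"]
        else PySem.Str.join "" [sanitized.getD "", "@wikimedia.local"]
      | none => PySem.Str.join "" [sanitized.getD "", "@wikimedia.local"]
    else
      match user_id with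
      | some u =>
        if u != 0 then PySem.Str.join "" ["wm.", PySem.Int.toStr u, "@wikimedia.local"]
        else "wikimedia.user@wikimedia.local"
      | none => "wikimedia.user@wikimedia.local"
  match email with
  | some e => if e != "" && PySem.Str.strip e != "" then e else rest
  | none => rest

-- ===== PORT B =====
def get_or_create_email_for_wikimedia_user_alt (username : String) (email : Option String) (user_id : Option Int) : String :=
  let rest : String :=
    let sanitized : Option String :=
      if username != "" then
        let s1 := PySem.Str.replace (PySem.Str.replace (PySem.Str.strip (PySem.Str.lower username)) " " ".") "_" "."
        -- ''.join(c for c in s1 if c.isalnum() or c in '.-'): joining singleton chars on "" is exactly String.ofList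
        let s2 := String.ofList (s1.toList.filter (fun c => PySem.Chars.isalnum c || c == '.' || c == '-'))
        -- '.'.join(part for part in s2.split('.') if part); sep "." is never empty so split? is always `some`
        some (PySem.Str.join "." (((PySem.Str.split? s2 ".").getD []).filter (fun p => p != "")))
      else none
    if sanitized.getD "" != "" then
      match user_id with
      | some u =>
        if u != 0 then PySem.Str.join "" [sanitized.getD "", ".", PySem.Int.toStr u, "@wikimedia.local"]
        else PySem.Str.join "" [sanitized.getD "", "@wikimedia.local"]
      | none => PySem.Str.join "" [sanitized.getD "", "@wikimedia.local"]
    else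
      match user_id with
      | some u =>
        if u != 0 then PySem.Str.join "" ["wm.", PySem.Int.toStr u, "@wikimedia.local"]
        else "wikimedia.user@wikimedia.local"
      | none => "wikimedia.user@wikimedia.local"
  match email with
  | some e => if e != "" && PySem.Str.strip e != "" then e else rest
  | none => rest

-- ===== PRECONDITION & SPEC =====
def Spec_get_or_create_email_for_wikimedia_user (username : String) (email : Option String) (user_id : Option Int) (out : String) : Prop := out = get_or_create_email_for_wikimedia_user_alt username email user_id
instance (username : String) (email : Option String) (user_id : Option Int) (out : String) : Decidable (Spec_get_or_create_email_for_wikimedia_user username email user_id out) := by unfold Spec_get_or_create_email_for_wikimedia_user; infer_instance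

-- ===== CLAIM (what is proved, stated in full; the proofs are below) =====
def Claim_equal_get_or_create_email_for_wikimedia_user : Prop := ∀ (username : String) (email : Option String) (user_id : Option Int), Dom_get_or_create_email_for_wikimedia_user username email user_id → Spec_get_or_create_email_for_wikimedia_user username email user_id (get_or_create_email_for_wikimedia_user username email user_id)

-- ===== LEMMAS AND PROOFS =====

def pvCollapse : List Char → List Char
  | [] => []
  | [c] => [c]
  | a :: b :: t => if a = '.' ∧ b = '.' then pvCollapse (b :: t) else a :: pvCollapse (b :: t)

def pvMs : List Char → List Char × List (List Char)
  | [] => ([], [])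
  | c :: t => if c = '.' then ([], (pvMs t).1 :: (pvMs t).2) else (c :: (pvMs t).1, (pvMs t).2)


theorem pvSplitOn_go_eq (fuel : Nat) : ∀ (l cur : List Char) (accs : List (List Char)),
    l.length ≤ fuel →
    PySem.Chars.splitOn.go ['.'] fuel l cur accs = accs.reverse ++ (cur.reverse ++ (pvMs l).1) :: (pvMs l).2 := by
  induction fuel with
  | zero =>
    intro l cur accs h
    have : l = [] := by cases l <;> simp_all
    subst this
    simp [PySem.Chars.splitOn.go, pvMs]
  | succ f ih =>
    intro l cur accs h
    match l with
    | [] => simp [PySem.Chars.splitOn.go, pvMs]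
    | c :: t =>
      by_cases hc : c = '.'
      · subst hc
        have hpre : (['.'] : List Char).isPrefixOf ('.' :: t) = true := by simp [List.isPrefixOf]
        simp only [PySem.Chars.splitOn.go, hpre, if_pos]
        rw [show List.drop (['.'] : List Char).length ('.' :: t) = t from rfl]
        rw [ih t [] (cur.reverse :: accs) (by simp at h; omega)]
        simp [pvMs]
      · have hpre : (['.'] : List Char).isPrefixOf (c :: t) = false := by
          simp [List.isPrefixOf]; exact fun h' => hc h'.symm
        simp only [PySem.Chars.splitOn.go, hpre, Bool.false_eq_true, if_false]
        rw [ih t (c :: cur) accs (by simp at h; omega)]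
        simp [pvMs, if_neg hc]

theorem pvSplitOn_eq (l : List Char) : PySem.Chars.splitOn l ['.'] = (pvMs l).1 :: (pvMs l).2 := by
  unfold PySem.Chars.splitOn
  rw [pvSplitOn_go_eq (l.length + 1) l [] [] (by omega)]
  simp


theorem pvRepOne_dd (u : List Char) : pvRepOne ('.' :: '.' :: u) = '.' :: pvRepOne u := by
  simp [pvRepOne]

theorem pvRepOne_nd {a b : Char} (u : List Char) (h : ¬ (a = '.' ∧ b = '.')) :
    pvRepOne (a :: b :: u) = a :: pvRepOne (b :: u) := by
  simp [pvRepOne, h]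

theorem pvCollapse_dd (u : List Char) : pvCollapse ('.' :: '.' :: u) = pvCollapse ('.' :: u) := by
  simp [pvCollapse]

theorem pvCollapse_nd {a b : Char} (u : List Char) (h : ¬ (a = '.' ∧ b = '.')) :
    pvCollapse (a :: b :: u) = a :: pvCollapse (b :: u) := by
  simp [pvCollapse, h]

theorem pvCollapse_cons_ne {c : Char} (u : List Char) (hc : c ≠ '.') :
    pvCollapse (c :: u) = c :: pvCollapse u := by
  match u with
  | [] => rfl
  | b :: v => exact pvCollapse_nd v (fun h => hc h.1)

theorem pvCollapse_repOne_cons (t : List Char) : ∀ (c : Char), pvCollapse (c :: pvRepOne t) = pvCollapse (c :: t) := by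
  induction t using pvRepOne.induct with
  | case1 => intro c; simp [pvRepOne]
  | case2 b => intro c; simp [pvRepOne]
  | case3 a b u h ih =>
    obtain ⟨ha, hb⟩ := h; subst ha; subst hb
    intro c
    rw [pvRepOne_dd]
    by_cases hc : c = '.'
    · subst hc
      rw [pvCollapse_dd, pvCollapse_dd, ih '.', pvCollapse_dd]
    · rw [pvCollapse_cons_ne _ hc, pvCollapse_cons_ne _ hc, ih '.', pvCollapse_dd]
  | case4 a b u h ih =>
    intro c
    rw [pvRepOne_nd _ h]
    by_cases hca : c = '.' ∧ a = '.'
    · obtain ⟨hc, ha⟩ := hca; subst hc; subst ha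
      rw [pvCollapse_dd, pvCollapse_dd, ih '.']
    · rw [pvCollapse_nd _ hca, pvCollapse_nd _ hca, ih a]

theorem pvCollapse_repOne (t : List Char) : pvCollapse (pvRepOne t) = pvCollapse t := by
  match t with
  | [] => rfl
  | [c] => rfl
  | a :: b :: u =>
    by_cases hab : a = '.' ∧ b = '.'
    · obtain ⟨ha, hb⟩ := hab; subst ha; subst hb
      rw [pvRepOne_dd, pvCollapse_repOne_cons u '.', pvCollapse_dd]
    · rw [pvRepOne_nd _ hab, pvCollapse_repOne_cons (b :: u) a]

theorem pvCollapse_no_dd (l : List Char) (h : ¬ (['.','.'] <:+: l)) : pvCollapse l = l := by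
  induction l using pvCollapse.induct with
  | case1 => rfl
  | case2 c => rfl
  | case3 a b t hab ih =>
    exfalso
    obtain ⟨ha, hb⟩ := hab; subst ha; subst hb
    exact h ⟨[], t, rfl⟩
  | case4 a b t hab ih =>
    rw [pvCollapse_nd _ hab]
    rw [ih (fun h' => h (List.infix_cons h'))]

def pvP : Char → Bool := fun c => c == '.'

def pvRstrip (l : List Char) : List Char := (List.dropWhile pvP l.reverse).reverse

theorem pvP_dot : pvP '.' = true := rfl

theorem pvContains_eq : (fun c => (['.'] : List Char).contains c) = pvP := by
  funext c; simp [pvP]; rfl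

theorem pvStripChars_eq (s : List Char) :
    PySem.Chars.stripChars s ['.'] = pvRstrip (List.dropWhile pvP s) := by
  unfold PySem.Chars.stripChars pvRstrip
  rw [show (fun c => (['.'] : List Char).contains c) = pvP from pvContains_eq]

theorem pvDW_cons_dot (x : List Char) : List.dropWhile pvP ('.' :: x) = List.dropWhile pvP x := by
  simp [List.dropWhile, pvP_dot]

theorem pvDW_cons_ne {c : Char} (x : List Char) (hc : c ≠ '.') :
    List.dropWhile pvP (c :: x) = c :: x := by
  have h : pvP c = false := by simp [pvP, hc]
  simp [List.dropWhile, h]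

theorem pvQ (t : List Char) : pvCollapse ('.' :: t) = '.' :: List.dropWhile pvP (pvCollapse t) := by
  induction t with
  | nil => rfl
  | cons c u ih =>
    by_cases hc : c = '.'
    · subst hc
      rw [pvCollapse_dd, ih]
      rw [show List.dropWhile pvP ('.' :: List.dropWhile pvP (pvCollapse u)) =
            List.dropWhile pvP (pvCollapse u) by
          rw [pvDW_cons_dot]; exact List.dropWhile_idempotent pvP (pvCollapse u)]
    · rw [pvCollapse_nd u (fun h => hc h.2), pvCollapse_cons_ne u hc, pvDW_cons_ne _ hc]

theorem pvRstrip_cons_ne {c : Char} (x : List Char) (hc : c ≠ '.') :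
    pvRstrip (c :: x) = c :: pvRstrip x := by
  unfold pvRstrip
  rw [List.reverse_cons, List.dropWhile_append]
  have hpc : pvP c = false := by simp [pvP, hc]
  split_ifs with h
  · rw [List.isEmpty_iff] at h
    simp [List.dropWhile, hpc, h]
  · simp

theorem pvRstrip_cons_of_ne_nil (x : List Char) (h : pvRstrip x ≠ []) (d : Char) :
    pvRstrip (d :: x) = d :: pvRstrip x := by
  unfold pvRstrip at h ⊢
  rw [List.reverse_cons, List.dropWhile_append]
  have h' : (List.dropWhile pvP x.reverse).isEmpty = false := by
    rw [List.isEmpty_eq_false_iff]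
    intro he; exact h (by rw [he]; rfl)
  rw [h']
  simp

theorem pvRstrip_ne_nil {c : Char} (r : List Char) (hpc : pvP c = false) :
    pvRstrip (c :: r) ≠ [] := by
  have hc : c ≠ '.' := by simpa [pvP] using hpc
  rw [pvRstrip_cons_ne r hc]
  simp

theorem pvJoinCons (c : Char) (h : List Char) (L : List (List Char)) :
    PySem.Chars.join ['.'] ((c :: h) :: L) = c :: PySem.Chars.join ['.'] (h :: L) := by
  match L with
  | [] => rw [PySem.Chars.join_singleton, PySem.Chars.join_singleton]
  | l :: ls =>
    rw [PySem.Chars.join_cons_cons, PySem.Chars.join_cons_cons]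
    simp

theorem pvJoin_ne_nil (f : List Char) (fs : List (List Char)) (hf : f ≠ []) :
    PySem.Chars.join ['.'] (f :: fs) ≠ [] := by
  match fs with
  | [] => rw [PySem.Chars.join_singleton]; exact hf
  | g :: gs => rw [PySem.Chars.join_cons_cons]; simp

theorem pvML (cs : List Char) :
    pvRstrip (List.dropWhile pvP (pvCollapse cs)) =
      PySem.Chars.join ['.'] (((pvMs cs).1 :: (pvMs cs).2).filter (· ≠ [])) ∧
    pvRstrip (pvCollapse cs) =
      PySem.Chars.join ['.'] ((pvMs cs).1 :: ((pvMs cs).2.filter (· ≠ []))) := by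
  induction cs with
  | nil =>
    refine ⟨?_, ?_⟩ <;>
      simp [pvCollapse, pvMs, pvRstrip, PySem.Chars.join_nil, PySem.Chars.join_singleton]
  | cons c u ih =>
    obtain ⟨iha, ihb⟩ := ih
    by_cases hc : c = '.'
    · subst hc
      have hms1 : (pvMs ('.' :: u)).1 = [] := by simp [pvMs]
      have hms2 : (pvMs ('.' :: u)).2 = (pvMs u).1 :: (pvMs u).2 := by simp [pvMs]
      have hdW : List.dropWhile pvP (pvCollapse ('.' :: u)) = List.dropWhile pvP (pvCollapse u) := by
        rw [pvQ, pvDW_cons_dot]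
        exact List.dropWhile_idempotent pvP (pvCollapse u)
      refine ⟨?_, ?_⟩
      · rw [hdW, hms1, hms2, iha]
        try simp [List.filter_cons]
      · rw [pvQ, hms1, hms2]
        cases hF : ((pvMs u).1 :: (pvMs u).2).filter (· ≠ []) with
        | nil =>
          rw [PySem.Chars.join_singleton]
          rw [hF, PySem.Chars.join_nil] at iha
          cases hmc : List.dropWhile pvP (pvCollapse u) with
          | nil => rfl
          | cons c' m' =>
            exfalso
            have hne : List.dropWhile pvP (pvCollapse u) ≠ [] := by rw [hmc]; simp
            have hpc : pvP c' = false := by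
              have h1 := List.head_dropWhile_not pvP hne
              have h2 : (List.dropWhile pvP (pvCollapse u)).head hne = c' := by
                simp [hmc]
              rw [h2] at h1; exact h1
            rw [hmc] at iha
            exact pvRstrip_ne_nil m' hpc iha
        | cons f fs =>
          rw [PySem.Chars.join_cons_cons]
          rw [hF] at iha
          have hfne : f ≠ [] := by
            have : f ∈ ((pvMs u).1 :: (pvMs u).2).filter (· ≠ []) := by
              rw [hF]; exact List.mem_cons_self
            simpa using (List.of_mem_filter this)
          rw [pvRstrip_cons_of_ne_nil _ (by rw [iha]; exact pvJoin_ne_nil f fs hfne)]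
          rw [iha]
          simp
    · have hms1 : (pvMs (c :: u)).1 = c :: (pvMs u).1 := by simp [pvMs, hc]
      have hms2 : (pvMs (c :: u)).2 = (pvMs u).2 := by simp [pvMs, hc]
      have hcol : pvCollapse (c :: u) = c :: pvCollapse u := pvCollapse_cons_ne u hc
      have hfilter : ((c :: (pvMs u).1) :: (pvMs u).2).filter (· ≠ []) =
          (c :: (pvMs u).1) :: ((pvMs u).2.filter (· ≠ [])) := by simp
      refine ⟨?_, ?_⟩
      · rw [hcol, pvDW_cons_ne _ hc, pvRstrip_cons_ne _ hc, ihb, hms1, hms2, hfilter, pvJoinCons]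
      · rw [hcol, pvRstrip_cons_ne _ hc, ihb, hms1, hms2, pvJoinCons]

theorem pvCore (cs : List Char) :
    PySem.Chars.stripChars (pvCollapse cs) ['.'] =
      PySem.Chars.join ['.'] ((PySem.Chars.splitOn cs ['.']).filter (· ≠ [])) := by
  rw [pvStripChars_eq, pvSplitOn_eq]
  exact (pvML cs).1

theorem pvDedupLoop_toList (s : String) : (pvDedupLoop s).toList = pvCollapse s.toList := by
  induction s using pvDedupLoop.induct with
  | case1 s h ih =>
    rw [pvDedupLoop, if_pos h, ih, PySem.Str.toList_replace]
    rw [show (".." : String).toList = ['.','.'] from rfl, show ("." : String).toList = ['.'] from rfl]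
    rw [pvReplace_dd, pvCollapse_repOne]
  | case2 s h =>
    rw [pvDedupLoop, if_neg h]
    rw [pvCollapse_no_dd]
    intro hinf
    exact h ((PySem.Str.isIn_iff_infix ".." s).mpr hinf)

theorem pvOfList_ne_empty (x : List Char) : (String.ofList x != "") = decide (x ≠ []) := by
  cases x with
  | nil => rfl
  | cons c r =>
    have h1 : String.ofList (c :: r) ≠ "" := by
      intro h
      have := congrArg String.toList h
      rw [String.toList_ofList] at this
      simp at this
    simp [h1]

theorem pvKey (s : String) : PySem.Str.stripChars (pvDedupLoop s) "." =
    PySem.Str.join "." (((PySem.Str.split? s ".").getD []).filter (fun p => p != "")) := by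
  apply String.toList_inj.mp
  rw [PySem.Str.toList_stripChars, show ("." : String).toList = ['.'] from rfl, pvDedupLoop_toList]
  rw [pvCore]
  have hsplit : PySem.Str.split? s "." =
      some (List.map String.ofList (PySem.Chars.splitOn s.toList ['.'])) := by
    unfold PySem.Str.split?
    rw [show ("." : String).toList = ['.'] from rfl]
    simp [PySem.Chars.split?]
  rw [hsplit]
  rw [show (some (List.map String.ofList (PySem.Chars.splitOn s.toList ['.']))).getD [] =
        List.map String.ofList (PySem.Chars.splitOn s.toList ['.']) from rfl]
  rw [List.filter_map, PySem.Str.toList_join, show ("." : String).toList = ['.'] from rfl]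
  rw [List.map_map]
  congr 1
  · rw [show (String.toList ∘ String.ofList) = id by funext x; simp [String.toList_ofList]]
    rw [List.map_id]
    congr 1
    funext x
    rw [Function.comp_apply, pvOfList_ne_empty]

-- ===== VERDICT (by name: the statement is the Claim_ definition above) =====
theorem get_or_create_email_for_wikimedia_user_spec : Claim_equal_get_or_create_email_for_wikimedia_user := by
  intro username email user_id _
  unfold Spec_get_or_create_email_for_wikimedia_user
  unfold get_or_create_email_for_wikimedia_user get_or_create_email_for_wikimedia_user_alt
  simp only [pvKey]
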